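-- pv_equiv track=rewrite | github.com/Rafiqdevhub/jobpsych_ai | app/services/job_description_parser.py | _find_preferred_sections
-- ===== SOURCE A (Python) =====
-- from typing import Dict, List, Any, Set
--
-- def _find_preferred_sections(text: str) -> List[str]:
--     """Find sections that contain preferred skills."""
--     sections = []
--
--     # Look for "preferred", "nice to have", etc.
--     preferred_headers = [
--         r'preferred', r'nice to have', r'plus', r'bonus', r'additional'
--     ]
--
--     lines = text.split('\n')
--     current_section = []
--     in_preferred = False
--
--     for line in lines:
--         line_lower = line.lower().strip()
--
--         if any(header in line_lower for header in preferred_headers):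
--             if current_section:
--                 sections.append('\n'.join(current_section))
--             current_section = [line]
--             in_preferred = True
--         elif in_preferred and line.strip():
--             current_section.append(line)
--
--     if current_section:
--         sections.append('\n'.join(current_section))
--
--     return sections
-- ===== SOURCE B (Python) =====
-- from typing import List
--
-- _PREFERRED_HEADERS = ['preferred', 'nice to have', 'plus', 'bonus', 'additional']
--
--
-- def _is_header(line: str) -> bool:
--     low = line.lower().strip()
--     return any(h in low for h in _PREFERRED_HEADERS)
--
--
-- def _span_non_header(lines: List[str]):
--     """Split lines at the first header line: (prefix without headers, rest)."""
--     for k, l in enumerate(lines):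
--         if _is_header(l):
--             return lines[:k], lines[k:]
--     return lines, []
--
--
-- def _build(lines: List[str]) -> List[str]:
--     """lines starts with a header line (or is empty); emit one section per header."""
--     if not lines:
--         return []
--     body, rest = _span_non_header(lines[1:])
--     kept = [l for l in body if l.strip()]
--     return ['\n'.join([lines[0]] + kept)] + _build(rest)
--
--
-- def _find_preferred_sections(text: str) -> List[str]:
--     _, tail = _span_non_header(text.split('\n'))
--     return _build(tail)
-- ===== Notes on version B (the rewrite author's own statement) =====
-- stated objective: alternative
-- what changed: Replaces A's single flag-and-accumulator pass (sections/current_section/in_preferred state) with a split-at-next-header recursive decomposition: drop lines before the first header, then for each header span off the following non-header lines, filter out blank ones, and join.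
import Mathlib
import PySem

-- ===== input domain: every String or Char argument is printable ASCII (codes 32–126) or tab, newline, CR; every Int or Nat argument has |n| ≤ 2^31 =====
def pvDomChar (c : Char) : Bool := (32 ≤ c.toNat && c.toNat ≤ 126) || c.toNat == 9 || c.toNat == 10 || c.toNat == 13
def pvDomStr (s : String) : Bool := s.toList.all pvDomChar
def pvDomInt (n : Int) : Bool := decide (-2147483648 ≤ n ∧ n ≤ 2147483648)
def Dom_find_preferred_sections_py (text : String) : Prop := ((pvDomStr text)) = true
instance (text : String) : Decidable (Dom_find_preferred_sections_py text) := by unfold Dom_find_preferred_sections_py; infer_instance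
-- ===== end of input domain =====

-- B replaces A's flag-and-accumulator single pass by a split-at-next-header recursive
-- decomposition (drop pre-header lines, then span off each section); same cost, alternative structure.


-- ===== PORT A =====
-- preferred_headers (the regex literals are plain substrings)
def pvHeaders : List String := ["preferred", "nice to have", "plus", "bonus", "additional"]

-- line.lower().strip() contains one of the headers (shared by both Pythons verbatim)
def pvIsHeader (line : String) : Bool :=
  let lineLower := PySem.Str.strip (PySem.Str.lower line)
  pvHeaders.any (fun header => PySem.Str.isIn header lineLower)

-- A's loop body; state = (sections, current_section, in_preferred)
def pvStepA (st : List String × List String × Bool) (line : String) :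
    List String × List String × Bool :=
  let (sections, currentSection, inPreferred) := st
  if pvIsHeader line then
    ((if currentSection.isEmpty then sections
      else sections ++ [PySem.Str.join "\n" currentSection]), [line], true)
  else if inPreferred && PySem.Str.strip line != "" then
    (sections, currentSection ++ [line], inPreferred)
  else
    (sections, currentSection, inPreferred)

-- A's trailing 'if current_section: sections.append(...); return sections'
def pvFinalizeA (r : List String × List String × Bool) : List String :=
  if r.2.1.isEmpty then r.1 else r.1 ++ [PySem.Str.join "\n" r.2.1]

def find_preferred_sections_py (text : String) : List String :=
  -- text.split('\n'): sep ≠ "" so split? is always some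
  let lines := (PySem.Str.split? text "\n").getD []
  pvFinalizeA (lines.foldl pvStepA ([], [], false))

-- ===== PORT B =====
-- _span_non_header(lines) = (lines.takeWhile pvNonHeader, lines.dropWhile pvNonHeader)
def pvNonHeader (line : String) : Bool := !pvIsHeader line

-- _build: one section per leading header line, recursing on the rest from the next header
def pvBuild (lines : List String) : List String :=
  match lines with
  | [] => []
  | head :: rest =>
    let body := rest.takeWhile pvNonHeader
    let next := rest.dropWhile pvNonHeader
    let kept := body.filter (fun l => PySem.Str.strip l != "")
    PySem.Str.join "\n" (head :: kept) :: pvBuild next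
termination_by lines.length
decreasing_by
  simp only [List.length_cons]
  exact Nat.lt_succ_of_le (List.length_dropWhile_le _ _)

def find_preferred_sections_py_alt (text : String) : List String :=
  let lines := (PySem.Str.split? text "\n").getD []
  pvBuild (lines.dropWhile pvNonHeader)

-- ===== PRECONDITION & SPEC =====
def Spec_find_preferred_sections_py (text : String) (out : List String) : Prop := out = find_preferred_sections_py_alt text
instance (text : String) (out : List String) : Decidable (Spec_find_preferred_sections_py text out) := by unfold Spec_find_preferred_sections_py; infer_instance

-- ===== CLAIM (what is proved, stated in full; the proofs are below) =====
def Claim_equal_find_preferred_sections_py : Prop := ∀ (text : String), Dom_find_preferred_sections_py text → Spec_find_preferred_sections_py text (find_preferred_sections_py text)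

-- ===== LEMMAS AND PROOFS =====

-- before the first header, A's loop leaves the empty state unchanged
theorem pvFoldl_skip (pre : List String) : ∀ s : List String,
    (∀ l ∈ pre, pvIsHeader l = false) →
    pre.foldl pvStepA (s, [], false) = (s, [], false) := by
  induction pre with
  | nil => intro s _; rfl
  | cons l t ih =>
    intro s h
    have hl := h l (by simp)
    simp only [List.foldl_cons, pvStepA, hl, Bool.false_eq_true, if_false, Bool.false_and]
    exact ih s (fun x hx => h x (by simp [hx]))

-- unfolding lemma for pvBuild on a cons cell
theorem pvBuild_cons (head : String) (rest : List String) :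
    pvBuild (head :: rest) =
      PySem.Str.join "\n"
          (head :: (rest.takeWhile pvNonHeader).filter (fun l => PySem.Str.strip l != ""))
        :: pvBuild (rest.dropWhile pvNonHeader) := by
  rw [pvBuild.eq_def]

-- in-section phase of A's loop = one pvBuild step on the span decomposition
theorem pvMain (rest : List String) : ∀ (s cur : List String), cur ≠ [] →
    pvFinalizeA (rest.foldl pvStepA (s, cur, true)) =
      s ++ PySem.Str.join "\n"
            (cur ++ (rest.takeWhile pvNonHeader).filter (fun l => PySem.Str.strip l != ""))
        :: pvBuild (rest.dropWhile pvNonHeader) := by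
  induction rest with
  | nil =>
    intro s cur hcur
    obtain ⟨c, cs, rfl⟩ := List.exists_cons_of_ne_nil hcur
    simp [pvFinalizeA, pvBuild]
  | cons l t ih =>
    intro s cur hcur
    by_cases hl : pvIsHeader l = true
    · have hcurE : cur.isEmpty = false := by
        cases cur with | nil => exact absurd rfl hcur | cons a b => rfl
      simp only [List.foldl_cons, pvStepA, hl, if_true, hcurE, Bool.false_eq_true, if_false]
      rw [ih (s ++ [PySem.Str.join "\n" cur]) [l] (by simp)]
      have hnh : pvNonHeader l = false := by simp [pvNonHeader, hl]
      simp [hnh, pvBuild_cons]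
    · have hl' : pvIsHeader l = false := by simpa using hl
      have hnh : pvNonHeader l = true := by simp [pvNonHeader, hl']
      by_cases hq : (PySem.Str.strip l != "") = true
      · simp only [List.foldl_cons, pvStepA, hl', Bool.false_eq_true, if_false,
          Bool.true_and, hq, if_true]
        rw [ih s (cur ++ [l]) (by simp)]
        simp [hnh, hq]
      · have hq' : (PySem.Str.strip l != "") = false := by simpa using hq
        simp only [List.foldl_cons, pvStepA, hl', Bool.false_eq_true, if_false,
          Bool.true_and, hq', if_false]
        rw [ih s cur hcur]
        simp [hnh, hq']

-- ===== VERDICT (by name: the statement is the Claim_ definition above) =====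
theorem find_preferred_sections_py_spec : Claim_equal_find_preferred_sections_py := by
  intro text _
  unfold Spec_find_preferred_sections_py
  show find_preferred_sections_py text = find_preferred_sections_py_alt text
  simp only [find_preferred_sections_py, find_preferred_sections_py_alt]
  set lines := (PySem.Str.split? text "\n").getD [] with hlines
  have hsplit : lines = lines.takeWhile pvNonHeader ++ lines.dropWhile pvNonHeader :=
    (List.takeWhile_append_dropWhile).symm
  have hpre : ∀ l ∈ lines.takeWhile pvNonHeader, pvIsHeader l = false := by
    intro l hlmem
    have := List.mem_takeWhile_imp hlmem
    simpa [pvNonHeader] using this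
  conv_lhs => rw [hsplit]
  rw [List.foldl_append, pvFoldl_skip _ _ hpre]
  cases hd : lines.dropWhile pvNonHeader with
  | nil => simp [pvFinalizeA, pvBuild]
  | cons h t =>
    have hh : pvNonHeader h = false := by
      have := List.head_dropWhile_not (p := pvNonHeader) (l := lines) (by simp [hd])
      simpa [hd] using this
    have hhdr : pvIsHeader h = true := by simpa [pvNonHeader] using hh
    simp only [List.foldl_cons, pvStepA, hhdr, List.isEmpty_nil, if_true]
    rw [pvMain t [] [h] (by simp)]
    simp [pvBuild_cons]
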